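-- pv_equiv track=rewrite | github.com/fabianruiz3/pokerbots-2026 | Camello_3.0.0/generate.py | normalize_3card_hand
-- ===== SOURCE A (Python) =====
-- def normalize_3card_hand(cards):
--     """Normalize 3-card hand for table lookup."""
--     rank_map = {'2':2,'3':3,'4':4,'5':5,'6':6,'7':7,'8':8,'9':9,
--                 'T':10,'J':11,'Q':12,'K':13,'A':14}
--
--     cards_info = []
--     for card in cards:
--         card_str = str(card)
--         cards_info.append((rank_map[card_str[0]], card_str[1]))
--
--     cards_info.sort(key=lambda x: x[0], reverse=True)
--
--     ranks = [c[0] for c in cards_info]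
--     suits = [c[1] for c in cards_info]
--
--     if suits[0] == suits[1] == suits[2]:
--         suit_pattern = 'AAA'
--     elif suits[0] == suits[1]:
--         suit_pattern = 'AA_'
--     elif suits[0] == suits[2]:
--         suit_pattern = 'A_A'
--     elif suits[1] == suits[2]:
--         suit_pattern = '_AA'
--     else:
--         suit_pattern = '___'
--
--     return (ranks[0], ranks[1], ranks[2], suit_pattern)
-- ===== SOURCE B (Python) =====
-- def normalize_3card_hand(cards):
--     """Normalize 3-card hand for table lookup."""
--     order = '23456789TJQKA'
--     info = [(order.index(str(c)[0]) + 2, str(c)[1]) for c in cards]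
--     info.sort(key=lambda x: x[0], reverse=True)
--     top = info[:3]
--     suits = [s for _, s in top]
--     pattern = ''.join('A' if suits.count(s) >= 2 else '_' for s in suits)
--     return (top[0][0], top[1][0], top[2][0], pattern)
-- ===== Notes on version B (the rewrite author's own statement) =====
-- stated objective: alternative
-- what changed: B parses ranks by position in a rank-order string instead of a dict, truncates to the top three after the same stable reverse sort, and derives the suit pattern by a per-position multiplicity rule (position is 'A' iff its suit occurs at least twice among the three) instead of A's chain of pairwise equality branches.
import Mathlib
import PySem

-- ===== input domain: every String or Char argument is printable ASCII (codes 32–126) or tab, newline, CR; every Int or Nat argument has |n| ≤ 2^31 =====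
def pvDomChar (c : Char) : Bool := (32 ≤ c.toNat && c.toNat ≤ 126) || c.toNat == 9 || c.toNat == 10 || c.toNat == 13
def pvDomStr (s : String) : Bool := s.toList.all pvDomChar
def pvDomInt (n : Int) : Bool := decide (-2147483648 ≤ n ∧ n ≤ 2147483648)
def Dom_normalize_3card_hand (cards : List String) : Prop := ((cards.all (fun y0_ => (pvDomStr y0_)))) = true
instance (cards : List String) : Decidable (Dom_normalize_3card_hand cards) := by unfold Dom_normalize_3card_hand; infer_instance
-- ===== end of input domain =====

-- B replaces A's rank dict by an index into a rank string and the chain of pairwise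
-- suit-equality branches by a per-position multiplicity rule (a suit position is 'A'
-- iff its suit occurs at least twice among the top three); objective: alternative.


-- ===== PORT A =====
def rankMapA : PySem.Dict Char Int :=
  PySem.Dict.ofList [('2',2),('3',3),('4',4),('5',5),('6',6),('7',7),('8',8),('9',9),
                     ('T',10),('J',11),('Q',12),('K',13),('A',14)]

-- rank_map[card_str[0]] / card_str[1]; the getD defaults are unreachable under Pre_
def cardInfoA (card : String) : Int × Char :=
  (rankMapA.getD ((PySem.Str.pyGet? card 0).getD ' ') 0,
   (PySem.Str.pyGet? card 1).getD ' ')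

def normalize_3card_hand (cards : List String) : Int × Int × Int × String :=
  let cards_info := cards.foldl (fun acc card => acc ++ [cardInfoA card]) []
  let cards_info := PySem.List.sorted cards_info (fun x => x.1) true
  let ranks := cards_info.map (fun c => c.1)
  let suits := cards_info.map (fun c => c.2)
  let suit_pattern :=
    if PySem.List.pyGetD suits 0 ' ' = PySem.List.pyGetD suits 1 ' ' ∧
       PySem.List.pyGetD suits 1 ' ' = PySem.List.pyGetD suits 2 ' ' then "AAA"
    else if PySem.List.pyGetD suits 0 ' ' = PySem.List.pyGetD suits 1 ' ' then "AA_"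
    else if PySem.List.pyGetD suits 0 ' ' = PySem.List.pyGetD suits 2 ' ' then "A_A"
    else if PySem.List.pyGetD suits 1 ' ' = PySem.List.pyGetD suits 2 ' ' then "_AA"
    else "___"
  (PySem.List.pyGetD ranks 0 0, PySem.List.pyGetD ranks 1 0, PySem.List.pyGetD ranks 2 0, suit_pattern)

-- ===== PORT B =====
-- order.index(ch) raises where ch is absent; Pre_ guarantees presence, where PySem.Str.find is exact
def cardInfoB (card : String) : Int × Char :=
  (PySem.Str.find "23456789TJQKA" (String.singleton ((PySem.Str.pyGet? card 0).getD ' ')) + 2,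
   (PySem.Str.pyGet? card 1).getD ' ')

def normalize_3card_hand_alt (cards : List String) : Int × Int × Int × String :=
  let info := PySem.List.sorted (cards.map cardInfoB) (fun x => x.1) true
  let top := PySem.List.slice info none (some 3)
  let suits := top.map (fun c => c.2)
  let pattern := String.ofList (suits.map (fun s => if 2 ≤ PySem.List.count suits s then 'A' else '_'))
  (PySem.List.pyGetD top 0 (0, ' ') |>.1, PySem.List.pyGetD top 1 (0, ' ') |>.1,
   PySem.List.pyGetD top 2 (0, ' ') |>.1, pattern)

-- ===== PRECONDITION & SPEC =====
-- Pre_ = exactly where A returns: at least 3 cards (else IndexError on suits[2]),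
-- each card of length ≥ 2 (else IndexError on card_str[1]) with a valid rank character (else KeyError)
def Pre_normalize_3card_hand (cards : List String) : Prop :=
  3 ≤ cards.length ∧ ∀ c ∈ cards,
    2 ≤ c.toList.length ∧
    c.toList.getD 0 ' ' ∈ ['2','3','4','5','6','7','8','9','T','J','Q','K','A']
instance (cards : List String) : Decidable (Pre_normalize_3card_hand cards) := by
  unfold Pre_normalize_3card_hand; infer_instance

def pvWitness_normalize_3card_hand : List String := ["As", "Kh", "Ks"]

def Spec_normalize_3card_hand (cards : List String) (out : Int × Int × Int × String) : Prop := out = normalize_3card_hand_alt cards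
instance (cards : List String) (out : Int × Int × Int × String) : Decidable (Spec_normalize_3card_hand cards out) := by unfold Spec_normalize_3card_hand; infer_instance

-- ===== CLAIM (what is proved, stated in full; the proofs are below) =====
def Claim_equal_normalize_3card_hand : Prop := ∀ (cards : List String), Dom_normalize_3card_hand cards → Pre_normalize_3card_hand cards → Spec_normalize_3card_hand cards (normalize_3card_hand cards)

-- ===== LEMMAS AND PROOFS =====

theorem cardInfo_eq (c : String)
    (h2 : 2 ≤ c.toList.length)
    (hm : c.toList.getD 0 ' ' ∈ ['2','3','4','5','6','7','8','9','T','J','Q','K','A']) :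
    cardInfoA c = cardInfoB c := by
  match hc : c.toList, h2 with
  | a :: b :: t, _ =>
    unfold cardInfoA cardInfoB
    have h0 : PySem.Str.pyGet? c 0 = some a := by
      simp [PySem.Str.pyGet?, hc, PySem.Chars.pyGet?, PySem.List.pyGet?_zero_cons]
    rw [hc] at hm
    rw [h0]
    simp only [Option.getD_some, List.getD] at hm ⊢
    fin_cases hm <;> (rw [Prod.mk.injEq]; exact ⟨by decide, rfl⟩)

theorem pattern_eq (s0 s1 s2 : Char) :
    (if s0 = s1 ∧ s1 = s2 then "AAA"
     else if s0 = s1 then "AA_"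
     else if s0 = s2 then "A_A"
     else if s1 = s2 then "_AA"
     else "___")
    = String.ofList ([s0,s1,s2].map (fun s => if 2 ≤ PySem.List.count [s0,s1,s2] s then 'A' else '_')) := by
  by_cases h01 : s0 = s1 <;> by_cases h12 : s1 = s2 <;> by_cases h02 : s0 = s2 <;>
    simp_all [PySem.List.count, List.count_cons, Ne.symm]

-- ===== VERDICT (by name: the statement is the Claim_ definition above) =====
theorem normalize_3card_hand_spec : Claim_equal_normalize_3card_hand := by
  intro cards _ hpre
  obtain ⟨hlen, hall⟩ := hpre
  unfold Spec_normalize_3card_hand normalize_3card_hand normalize_3card_hand_alt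
  rw [PySem.List.foldl_append_singleton_eq_map, List.nil_append]
  rw [List.map_congr_left (fun c hc => cardInfo_eq c (hall c hc).1 (hall c hc).2)]
  have hlen' : 3 ≤ (PySem.List.sorted (cards.map cardInfoB) (fun x => x.1) true).length := by
    rw [PySem.List.length_sorted, List.length_map]; exact hlen
  rcases hl : PySem.List.sorted (cards.map cardInfoB) (fun x => x.1) true with _ | ⟨x, _ | ⟨y, _ | ⟨z, rest⟩⟩⟩ <;>
    rw [hl] at hlen' <;> simp only [List.length_nil, List.length_cons] at hlen' <;> try omega
  have htake : PySem.List.slice (x :: y :: z :: rest) none (some 3) = [x, y, z] := by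
    simp [pysem]
  have e0 : PySem.List.pyIdx? (rest.length + 1 + 1 + 1) (0 : Int) = some 0 := by
    unfold PySem.List.pyIdx?; split_ifs <;> simp_all <;> try omega
  have e1 : PySem.List.pyIdx? (rest.length + 1 + 1 + 1) (1 : Int) = some 1 := by
    unfold PySem.List.pyIdx?; split_ifs <;> simp_all <;> try omega
  have e2 : PySem.List.pyIdx? (rest.length + 1 + 1 + 1) (2 : Int) = some 2 := by
    unfold PySem.List.pyIdx?; split_ifs <;> simp_all <;> try omega
  have f0 : PySem.List.pyIdx? 3 (0 : Int) = some 0 := rfl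
  have f1 : PySem.List.pyIdx? 3 (1 : Int) = some 1 := rfl
  have f2 : PySem.List.pyIdx? 3 (2 : Int) = some 2 := rfl
  simp only [hl, htake, List.map_cons, List.map_nil]
  simp [PySem.List.pyGetD, f0, f1, f2, PySem.List.pyGet?, e0, e1, e2, pattern_eq x.2 y.2 z.2]
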